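-- pv_equiv track=rewrite | github.com/shawpoufo/tp_rech_op | byListe.py | getPreviousFromNext
-- ===== SOURCE A (Python) =====
-- def getPreviousFromNext(nextDict):
--     prevDict = {}
--     for k in nextDict:
--         prevDict[k] = []
--         for j in nextDict:
--             if(k in nextDict[j]):
--                 prevDict[k].append(j)
--     return prevDict
-- ===== SOURCE B (Python) =====
-- def getPreviousFromNext(nextDict):
--     prev = {k: [] for k in nextDict}
--     for j, succs in nextDict.items():
--         for x in dict.fromkeys(succs):
--             if x in prev:
--                 prev[x].append(j)
--     return prev
-- ===== Notes on version B (the rewrite author's own statement) =====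
-- stated objective: faster
-- what changed: Instead of A's nested scan over all key pairs (for each key k, scan every key j and test k in nextDict[j]), B initializes all predecessor lists once and makes a single pass over each node's successor list, appending j to the predecessor list of each distinct successor that is a key.
import Mathlib
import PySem

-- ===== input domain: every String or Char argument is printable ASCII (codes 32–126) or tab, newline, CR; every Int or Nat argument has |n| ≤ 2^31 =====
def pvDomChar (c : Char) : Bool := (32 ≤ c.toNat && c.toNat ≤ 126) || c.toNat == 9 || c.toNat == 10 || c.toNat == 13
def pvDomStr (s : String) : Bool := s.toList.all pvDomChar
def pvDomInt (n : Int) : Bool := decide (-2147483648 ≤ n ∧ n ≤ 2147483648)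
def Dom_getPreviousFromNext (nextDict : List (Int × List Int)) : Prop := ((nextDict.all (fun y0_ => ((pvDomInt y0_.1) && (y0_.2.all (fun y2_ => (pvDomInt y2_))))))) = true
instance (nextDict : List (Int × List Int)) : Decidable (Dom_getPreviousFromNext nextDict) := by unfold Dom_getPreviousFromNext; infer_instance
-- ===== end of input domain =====

-- B replaces A's nested scan over all key pairs by a single pass over each node's
-- successor list, appending j to the predecessor list of each distinct successor that is a key.

-- ===== PORT A =====
def getPreviousFromNext (nextDict : List (Int × List Int)) : List (Int × List Int) :=
  let nd := PySem.Dict.ofList nextDict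
  let prev := nd.keys.foldl (fun prev k =>
      nd.keys.foldl (fun prev j =>
        if k ∈ nd.getD j [] then prev.modify k [] (fun l => l ++ [j]) else prev)
        (prev.insert k []))
    PySem.Dict.empty
  prev.items

-- ===== PORT B =====
def getPreviousFromNext_alt (nextDict : List (Int × List Int)) : List (Int × List Int) :=
  let nd := PySem.Dict.ofList nextDict
  let prev0 := nd.keys.foldl (fun d k => d.insert k ([] : List Int)) PySem.Dict.empty
  let prev := nd.items.foldl (fun prev p =>
      (PySem.List.dedup p.2).foldl (fun prev x =>
        if prev.contains x then prev.modify x [] (fun l => l ++ [p.1]) else prev) prev)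
    prev0
  prev.items

-- ===== PRECONDITION & SPEC =====
def Spec_getPreviousFromNext (nextDict : List (Int × List Int)) (out : List (Int × List Int)) : Prop := out = getPreviousFromNext_alt nextDict
instance (nextDict : List (Int × List Int)) (out : List (Int × List Int)) : Decidable (Spec_getPreviousFromNext nextDict out) := by unfold Spec_getPreviousFromNext; infer_instance

-- ===== CLAIM (what is proved, stated in full; the proofs are below) =====
def Claim_equal_getPreviousFromNext : Prop := ∀ (nextDict : List (Int × List Int)), Dom_getPreviousFromNext nextDict → Spec_getPreviousFromNext nextDict (getPreviousFromNext nextDict)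

-- ===== LEMMAS AND PROOFS =====

-- canonical result: for each key k (in key order), the keys j whose successor list contains k
def pvF (nd : PySem.Dict Int (List Int)) (k : Int) : List Int :=
  nd.keys.filter (fun j => decide (k ∈ nd.getD j []))

theorem innerA_keys_getD (js : List Int) (c : Int → Prop) [DecidablePred c] (k : Int)
    (d : PySem.Dict Int (List Int)) (h : d.contains k = true) :
    (js.foldl (fun d j => if c j then d.modify k [] (fun l => l ++ [j]) else d) d).keys = d.keys ∧
    ∀ k', (js.foldl (fun d j => if c j then d.modify k [] (fun l => l ++ [j]) else d) d).getD k' [] =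
      d.getD k' [] ++ (if k' = k then js.filter (fun j => decide (c j)) else []) := by
  induction js generalizing d with
  | nil => simp
  | cons j js ih =>
    simp only [List.foldl_cons, List.filter_cons]
    by_cases hc : c j
    · have hco : (d.modify k [] (fun l => l ++ [j])).contains k = true := by
        simp [PySem.Dict.contains_modify, h]
      obtain ⟨hk, hg⟩ := ih (d.modify k [] (fun l => l ++ [j])) hco
      simp only [if_pos hc] at *
      refine ⟨by rw [hk, PySem.Dict.keys_modify, PySem.Dict.keys_insert_of_contains _ _ h], ?_⟩
      intro k'
      rw [hg k', PySem.Dict.getD_modify]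
      by_cases hk' : k' = k
      · subst hk'; simp [hc]
      · simp [hk']
    · simp only [if_neg hc]
      obtain ⟨hk, hg⟩ := ih d h
      refine ⟨hk, ?_⟩
      intro k'
      rw [hg k']
      simp [hc]

theorem outerA (nd : PySem.Dict Int (List Int)) (l : List Int) (d : PySem.Dict Int (List Int))
    (hl : l.Nodup) (hdisj : ∀ k ∈ l, d.contains k = false) :
    (l.foldl (fun prev k =>
        nd.keys.foldl (fun prev j =>
          if k ∈ nd.getD j [] then prev.modify k [] (fun l => l ++ [j]) else prev)
          (prev.insert k [])) d).keys = d.keys ++ l ∧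
    ∀ k', (l.foldl (fun prev k =>
        nd.keys.foldl (fun prev j =>
          if k ∈ nd.getD j [] then prev.modify k [] (fun l => l ++ [j]) else prev)
          (prev.insert k [])) d).getD k' [] =
      if k' ∈ l then pvF nd k' else d.getD k' [] := by
  induction l generalizing d with
  | nil => simp
  | cons k l ih =>
    simp only [List.foldl_cons]
    have hfresh : d.contains k = false := hdisj k (by simp)
    have hnodup := hl
    rw [List.nodup_cons] at hnodup
    -- the state after processing k
    set d1 := nd.keys.foldl (fun prev j =>
        if k ∈ nd.getD j [] then prev.modify k [] (fun l => l ++ [j]) else prev)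
        (d.insert k []) with hd1
    have hins : (d.insert k ([] : List Int)).contains k = true := PySem.Dict.contains_insert_self d k []
    obtain ⟨hk1, hg1⟩ := innerA_keys_getD nd.keys (fun j => k ∈ nd.getD j []) k (d.insert k []) hins
    have hk1' : d1.keys = d.keys ++ [k] := by
      rw [hd1, hk1, PySem.Dict.keys_insert_of_not_contains _ _ hfresh]
    have hg1' : ∀ k', d1.getD k' [] = if k' = k then pvF nd k else d.getD k' [] := by
      intro k'
      rw [hd1, hg1 k', PySem.Dict.getD_insert]
      by_cases hk' : k' = k
      · subst hk'; simp [pvF]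
      · simp [hk']
    have hdisj1 : ∀ m ∈ l, d1.contains m = false := by
      intro m hm
      have hmk : m ≠ k := fun h => hnodup.1 (h ▸ hm)
      have : m ∉ d1.keys := by
        rw [hk1']
        simp only [List.mem_append, List.mem_singleton]
        rintro (h | h)
        · exact absurd ((PySem.Dict.contains_iff_mem_keys d m).2 h) (by simp [hdisj m (by simp [hm])])
        · exact hmk h
      cases hcon : d1.contains m with
      | false => rfl
      | true => exact absurd ((PySem.Dict.contains_iff_mem_keys d1 m).1 hcon) this
    obtain ⟨hk2, hg2⟩ := ih d1 hnodup.2 hdisj1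
    refine ⟨by rw [hk2, hk1']; simp, ?_⟩
    intro k'
    rw [hg2 k']
    by_cases hmem : k' ∈ l
    · simp [hmem]
    · rw [if_neg hmem, hg1' k']
      by_cases hk' : k' = k
      · subst hk'; simp
      · simp [hk', hmem]

theorem innerB (xs : List Int) (j : Int) (d : PySem.Dict Int (List Int)) (hxs : xs.Nodup) :
    (xs.foldl (fun d x => if d.contains x then d.modify x [] (fun l => l ++ [j]) else d) d).keys = d.keys ∧
    ∀ k, (xs.foldl (fun d x => if d.contains x then d.modify x [] (fun l => l ++ [j]) else d) d).getD k [] =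
      d.getD k [] ++ (if d.contains k = true ∧ k ∈ xs then [j] else []) := by
  induction xs generalizing d with
  | nil => simp
  | cons x xs ih =>
    rw [List.nodup_cons] at hxs
    simp only [List.foldl_cons]
    by_cases hc : d.contains x = true
    · rw [if_pos hc]
      set d1 := d.modify x [] (fun l => l ++ [j]) with hd1
      have hkeys1 : d1.keys = d.keys := by
        rw [hd1, PySem.Dict.keys_modify, PySem.Dict.keys_insert_of_contains _ _ hc]
      have hcont1 : ∀ k, d1.contains k = d.contains k := by
        intro k
        cases h1 : d1.contains k with
        | true => exact ((PySem.Dict.contains_iff_mem_keys d k).2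
            (hkeys1 ▸ (PySem.Dict.contains_iff_mem_keys d1 k).1 h1)).symm
        | false =>
          cases h2 : d.contains k with
          | false => rfl
          | true => exact absurd ((PySem.Dict.contains_iff_mem_keys d1 k).2
              (hkeys1 ▸ (PySem.Dict.contains_iff_mem_keys d k).1 h2)) (by simp [h1])
      obtain ⟨hk2, hg2⟩ := ih d1 hxs.2
      refine ⟨by rw [hk2, hkeys1], ?_⟩
      intro k
      rw [hg2 k, hcont1 k, hd1, PySem.Dict.getD_modify]
      by_cases hk : k = x
      · subst hk
        have : k ∉ xs := hxs.1
        simp [hc, this]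
      · simp only [if_neg hk, List.mem_cons]
        by_cases hm : k ∈ xs <;> simp [hm, hk]
    · rw [if_neg hc]
      obtain ⟨hk2, hg2⟩ := ih d hxs.2
      refine ⟨hk2, ?_⟩
      intro k
      rw [hg2 k]
      by_cases hk : k = x
      · subst hk; simp [hc]
      · simp only [List.mem_cons]
        by_cases hm : k ∈ xs <;> simp [hm, hk]

theorem outerB (ps : List (Int × List Int)) (d : PySem.Dict Int (List Int)) :
    (ps.foldl (fun prev p =>
        (PySem.List.dedup p.2).foldl (fun prev x =>
          if prev.contains x then prev.modify x [] (fun l => l ++ [p.1]) else prev) prev) d).keys = d.keys ∧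
    ∀ k, (ps.foldl (fun prev p =>
        (PySem.List.dedup p.2).foldl (fun prev x =>
          if prev.contains x then prev.modify x [] (fun l => l ++ [p.1]) else prev) prev) d).getD k [] =
      d.getD k [] ++ (if d.contains k = true then (ps.filter (fun p => decide (k ∈ p.2))).map (·.1) else []) := by
  induction ps generalizing d with
  | nil => simp
  | cons p ps ih =>
    simp only [List.foldl_cons, List.filter_cons]
    set d1 := (PySem.List.dedup p.2).foldl (fun prev x =>
          if prev.contains x then prev.modify x [] (fun l => l ++ [p.1]) else prev) d with hd1
    obtain ⟨hk1, hg1⟩ := innerB (PySem.List.dedup p.2) p.1 d (PySem.List.nodup_dedup p.2)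
    have hcont1 : ∀ k, d1.contains k = d.contains k := by
      intro k
      cases h1 : d1.contains k with
      | true => exact ((PySem.Dict.contains_iff_mem_keys d k).2
          (hk1 ▸ (PySem.Dict.contains_iff_mem_keys d1 k).1 h1)).symm
      | false =>
        cases h2 : d.contains k with
        | false => rfl
        | true => exact absurd ((PySem.Dict.contains_iff_mem_keys d1 k).2
            (hk1 ▸ (PySem.Dict.contains_iff_mem_keys d k).1 h2)) (by simp [h1])
    obtain ⟨hk2, hg2⟩ := ih d1
    refine ⟨by rw [hk2, hk1], ?_⟩
    intro k
    rw [hg2 k, hcont1 k, hg1 k]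
    by_cases hc : d.contains k = true
    · by_cases hm : k ∈ p.2 <;>
        simp [hc, hm]
    · simp [hc]

theorem portA_canon (nextDict : List (Int × List Int)) :
    getPreviousFromNext nextDict =
      (PySem.Dict.ofList nextDict).keys.map (fun k => (k, pvF (PySem.Dict.ofList nextDict) k)) := by
  unfold getPreviousFromNext
  set nd := PySem.Dict.ofList nextDict with hnd
  have hnodup : nd.keys.Nodup := PySem.Dict.nodup_keys_ofList nextDict
  obtain ⟨hkeys, hgetD⟩ := outerA nd nd.keys PySem.Dict.empty hnodup (by simp)
  set r := nd.keys.foldl (fun prev k =>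
      nd.keys.foldl (fun prev j =>
        if k ∈ nd.getD j [] then prev.modify k [] (fun l => l ++ [j]) else prev)
        (prev.insert k [])) PySem.Dict.empty with hr
  have hrkeys : r.keys = nd.keys := by rw [hr, hkeys]; simp
  have hrnodup : r.keys.Nodup := hrkeys ▸ hnodup
  rw [PySem.Dict.items_eq_map_keys r hrnodup [], hrkeys]
  apply List.map_congr_left
  intro k hk
  rw [hr, hgetD k, if_pos hk]

theorem portB_canon (nextDict : List (Int × List Int)) :
    getPreviousFromNext_alt nextDict =
      (PySem.Dict.ofList nextDict).keys.map (fun k => (k, pvF (PySem.Dict.ofList nextDict) k)) := by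
  unfold getPreviousFromNext_alt
  set nd := PySem.Dict.ofList nextDict with hnd
  have hnodup : nd.keys.Nodup := PySem.Dict.nodup_keys_ofList nextDict
  set d0 := nd.keys.foldl (fun d k => d.insert k ([] : List Int)) PySem.Dict.empty with hd0
  have hd0items : d0.items = nd.keys.map (fun k => (k, ([] : List Int))) := by
    rw [hd0]
    have := PySem.Dict.items_foldl_insert_fresh nd.keys (fun k => k) (fun _ => ([] : List Int))
      PySem.Dict.empty (by simp) (by simpa using hnodup)
    simpa using this
  have hd0keys : d0.keys = nd.keys := by
    show d0.items.map (·.1) = nd.keys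
    rw [hd0items]; simp [Function.comp_def]
  have hd0getD : ∀ k, d0.getD k [] = [] := by
    intro k
    by_cases hc : d0.contains k = true
    · have hkm : k ∈ d0.keys := (PySem.Dict.contains_iff_mem_keys d0 k).1 hc
      have : (k, ([] : List Int)) ∈ d0.items := by
        rw [hd0items]
        rw [hd0keys] at hkm
        exact List.mem_map.2 ⟨k, hkm, rfl⟩
      exact PySem.Dict.getD_of_mem_items d0 this (hd0keys.symm ▸ hnodup) []
    · exact PySem.Dict.getD_of_not_contains d0 [] (by simpa using hc)
  obtain ⟨hkeys, hgetD⟩ := outerB nd.items d0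
  set r := nd.items.foldl (fun prev p =>
      (PySem.List.dedup p.2).foldl (fun prev x =>
        if prev.contains x then prev.modify x [] (fun l => l ++ [p.1]) else prev) prev) d0 with hr
  have hrkeys : r.keys = nd.keys := by rw [hr, hkeys, hd0keys]
  rw [PySem.Dict.items_eq_map_keys r (hrkeys ▸ hnodup) [], hrkeys]
  apply List.map_congr_left
  intro k hk
  have hcont : d0.contains k = true := (PySem.Dict.contains_iff_mem_keys d0 k).2 (hd0keys ▸ hk)
  rw [hr, hgetD k, hd0getD k, if_pos hcont]
  -- (nd.items.filter …).map (·.1) = pvF nd k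
  rw [PySem.Dict.items_eq_map_keys nd hnodup []]
  rw [List.filter_map, List.map_map]
  simp [pvF, Function.comp_def]

-- ===== VERDICT (by name: the statement is the Claim_ definition above) =====
theorem getPreviousFromNext_spec : Claim_equal_getPreviousFromNext := by
  intro nextDict _
  unfold Spec_getPreviousFromNext
  rw [portA_canon, portB_canon]
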